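-- pv_equiv track=rewrite | github.com/minocrafft/CodingTest | Programmers/level2/148653.py | solution
-- ===== SOURCE A (Python) =====
-- def solution(storey):
--     count = 0
--     storey = [int(num) for num in str(storey)]
--
--     while storey:
--         floor = storey.pop()
--         if floor < 5:
--             count += floor
--         elif floor == 5:
--             count += floor
--             if storey and storey[-1] >= 5:
--                 storey[-1] += 1
--         else:
--             count += 10 - floor
--             if storey:
--                 storey[-1] += 1
--             else:
--                 count += 1
--
--     return count
-- ===== SOURCE B (Python) =====
-- def solution(storey):
--     # Two-state dynamic program over the digits (least significant first):
--     # a = min presses so that the digits handled so far match exactly,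
--     # b = min presses so that the remaining number must be one larger (a carry).
--     # No lookahead and no mutation; the optimum is taken by min at each step.
--     ds = [int(ch) for ch in str(storey)][::-1]
--     a, b = ds[0], 10 - ds[0]
--     for d in ds[1:]:
--         a, b = min(a + d, b + d + 1), min(a + 10 - d, b + 9 - d)
--     return min(a, b + 1)
-- ===== Notes on version B (the rewrite author's own statement) =====
-- stated objective: alternative
-- what changed: B replaces A's greedy loop over a mutable digit list (pop, lookahead on storey[-1], in-place carry bump) with a two-state dynamic program folded once over the digits, tracking the min cost of matching the digits exactly vs. overshooting by one carry, and taking the min at the end.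
import Mathlib
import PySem

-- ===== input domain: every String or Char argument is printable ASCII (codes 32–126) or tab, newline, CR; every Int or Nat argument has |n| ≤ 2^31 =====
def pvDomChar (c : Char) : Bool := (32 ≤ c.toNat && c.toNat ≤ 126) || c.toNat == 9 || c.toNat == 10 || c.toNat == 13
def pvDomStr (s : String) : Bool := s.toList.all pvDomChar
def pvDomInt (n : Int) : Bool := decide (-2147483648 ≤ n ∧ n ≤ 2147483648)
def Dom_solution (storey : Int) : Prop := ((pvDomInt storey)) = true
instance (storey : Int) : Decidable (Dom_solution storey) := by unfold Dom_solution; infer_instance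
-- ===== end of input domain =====

-- B replaces A's lookahead greedy over a mutable digit list with a two-state
-- dynamic program (exact cost / +1-carry cost) folded over the digits (alternative algorithm, same cost).

-- ===== PORT A =====
-- [int(num) for num in str(storey)]; int('-') raises ValueError → negatives excluded by Pre_solution
def solutionDigits (storey : Int) : List Int :=
  (PySem.Int.toChars storey).map (fun c => (PySem.Int.ofChars? [c]).getD 0)

-- the while loop; Python pops from the END of the list, so the port keeps the stack
-- reversed (head = Python's last element, storey[-1] = the head of the tail).
def solutionLoop : List Int → Int → Int
  | [], count => count
  | floor :: rest, count =>
    if floor < 5 then solutionLoop rest (count + floor)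
    else if floor = 5 then
      match rest with
      | top :: rs =>
        if top ≥ 5 then solutionLoop ((top + 1) :: rs) (count + floor)
        else solutionLoop (top :: rs) (count + floor)
      | [] => solutionLoop [] (count + floor)
    else
      match rest with
      | top :: rs => solutionLoop ((top + 1) :: rs) (count + (10 - floor))
      | [] => solutionLoop [] (count + (10 - floor) + 1)
  termination_by l _ => l.length

def solution (storey : Int) : Int := solutionLoop (solutionDigits storey).reverse 0

-- ===== PORT B =====
-- Source B's own digit parse: [int(ch) for ch in str(storey)] (raises on negatives too)
def solutionAltDigits (storey : Int) : List Int :=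
  (PySem.Int.toChars storey).map (fun c => (PySem.Int.ofChars? [c]).getD 0)

-- the for-loop over ds[1:], threading the pair (a, b)
def solutionAltLoop : List Int → Int × Int → Int × Int
  | [], ab => ab
  | d :: rest, (a, b) =>
    solutionAltLoop rest (min (a + d) (b + d + 1), min (a + 10 - d) (b + 9 - d))

def solution_alt (storey : Int) : Int :=
  match (solutionAltDigits storey).reverse with
  | [] => 0          -- unreachable: str(int) is never empty (ds[0] would raise IndexError)
  | d :: rest =>
    let p := solutionAltLoop rest (d, 10 - d)
    min p.1 (p.2 + 1)

-- ===== PRECONDITION & SPEC =====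
-- Pre_ excludes negative storey, on which A raises ValueError while parsing the digits of str(storey).
def Pre_solution (storey : Int) : Prop := 0 ≤ storey
instance (storey : Int) : Decidable (Pre_solution storey) := by unfold Pre_solution; infer_instance
def pvWitness_solution : Int := (2554)

def Spec_solution (storey : Int) (out : Int) : Prop := out = solution_alt storey
instance (storey : Int) (out : Int) : Decidable (Spec_solution storey out) := by unfold Spec_solution; infer_instance

-- ===== CLAIM (what is proved, stated in full; the proofs are below) =====
def Claim_equal_solution : Prop := ∀ (storey : Int), Dom_solution storey → Pre_solution storey → Spec_solution storey (solution storey)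

-- ===== LEMMAS AND PROOFS =====

lemma solutionLoop_nil (c : Int) : solutionLoop [] c = c := by
  rw [solutionLoop.eq_def]

lemma solutionLoop_cons (floor : Int) (rest : List Int) (c : Int) :
    solutionLoop (floor :: rest) c =
      if floor < 5 then solutionLoop rest (c + floor)
      else if floor = 5 then
        match rest with
        | top :: rs =>
          if top ≥ 5 then solutionLoop ((top + 1) :: rs) (c + floor)
          else solutionLoop (top :: rs) (c + floor)
        | [] => solutionLoop [] (c + floor)
      else
        match rest with
        | top :: rs => solutionLoop ((top + 1) :: rs) (c + (10 - floor))
        | [] => solutionLoop [] (c + (10 - floor) + 1) := by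
  rw [solutionLoop.eq_def]

lemma solutionLoop_one (floor c : Int) :
    solutionLoop [floor] c =
      if floor < 5 then solutionLoop [] (c + floor)
      else if floor = 5 then solutionLoop [] (c + floor)
      else solutionLoop [] (c + (10 - floor) + 1) := by
  rw [solutionLoop_cons]

lemma solutionLoop_two (floor t : Int) (rs : List Int) (c : Int) :
    solutionLoop (floor :: t :: rs) c =
      if floor < 5 then solutionLoop (t :: rs) (c + floor)
      else if floor = 5 then
        (if t ≥ 5 then solutionLoop ((t + 1) :: rs) (c + floor)
         else solutionLoop (t :: rs) (c + floor))
      else solutionLoop ((t + 1) :: rs) (c + (10 - floor)) := by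
  rw [solutionLoop_cons]

-- greedy carry applied to the head of the remaining digit list (Python's storey[-1] += 1)
def pvBump (L : List Int) (c : Int) : List Int :=
  match L with | [] => [] | d :: r => (d + c) :: r

-- the carry A's 5-branch produces: 1 iff the next digit is ≥ 5
def pvHead5 (L : List Int) : Int :=
  match L with | [] => 0 | d :: _ => if d ≥ 5 then 1 else 0

lemma pvBump_zero (L : List Int) : pvBump L 0 = L := by
  cases L <;> simp [pvBump]

-- core correspondence: A's greedy loop (with pending carry c on the head) equals
-- B's DP folded over the same remaining digits, under the invariant relating
-- the greedy count g to the DP pair (a, b).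
lemma loop_dp (L : List Int) : ∀ (g a b c : Int),
    (∀ x ∈ L, 0 ≤ x ∧ x ≤ 9) →
    ((c = 0 ∧ a = g ∧ g + 1 ≤ b) ∨ (c = 1 ∧ b = g ∧ g + 1 ≤ a) ∨
     (a = g ∧ b = g ∧ c = pvHead5 L)) →
    (L = [] → c = 0) →
    solutionLoop (pvBump L c) g
      = min (solutionAltLoop L (a, b)).1 ((solutionAltLoop L (a, b)).2 + 1) := by
  induction L with
  | nil =>
    intro g a b c _ hinv hnil
    have hc := hnil rfl
    subst hc
    simp only [pvBump, solutionLoop_nil, solutionAltLoop, pvHead5] at *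
    omega
  | cons d rest ih =>
    intro g a b c hdig hinv hnil
    have hd := hdig d (by simp)
    have hrest : ∀ x ∈ rest, 0 ≤ x ∧ x ≤ 9 := fun x hx => hdig x (by simp [hx])
    have hc01 : c = 0 ∨ c = 1 := by
      rcases hinv with h | h | h
      · exact Or.inl h.1
      · exact Or.inr h.1
      · rcases h with ⟨_, _, hc⟩
        simp only [pvHead5] at hc
        split_ifs at hc <;> [exact Or.inr hc; exact Or.inl hc]
    -- RHS one step of the DP
    have hRHS : solutionAltLoop (d :: rest) (a, b)
        = solutionAltLoop rest (min (a + d) (b + d + 1), min (a + 10 - d) (b + 9 - d)) := rfl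
    set A' := min (a + d) (b + d + 1) with hA'
    set B' := min (a + 10 - d) (b + 9 - d) with hB'
    show solutionLoop ((d + c) :: rest) g = _
    rw [hRHS]
    by_cases h5 : d + c < 5
    · -- effective digit < 5: greedy keeps it, no carry out
      rw [solutionLoop_cons, if_pos h5]
      have key := ih (g + (d + c)) A' B' 0 hrest
        (by
          left
          refine ⟨rfl, ?_, ?_⟩ <;>
          · rcases hinv with h | h | h
            · omega
            · omega
            · rcases h with ⟨ha, hb, hc⟩
              simp only [pvHead5] at hc
              split_ifs at hc <;> omega)
        (fun _ => rfl)
      rw [pvBump_zero] at key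
      exact key
    · by_cases heq : d + c = 5
      · -- effective digit = 5: A bumps the next digit iff it is ≥ 5
        have hne : ¬ d + c < 5 := h5
        cases rest with
        | nil =>
          rw [solutionLoop_cons, if_neg hne, if_pos heq]
          simp only [solutionLoop_nil, solutionAltLoop]
          rcases hinv with h | h | h
          · omega
          · omega
          · rcases h with ⟨_, _, hc⟩
            simp only [pvHead5] at hc
            split_ifs at hc <;> omega
        | cons t rs =>
          have ht := hrest t (by simp)
          -- invariant after a 5: a = b = g + 5, carry is pvHead5 (t :: rs)
          have hAB : A' = g + 5 ∧ B' = g + 5 := by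
            rcases hinv with h | h | h
            · omega
            · omega
            · rcases h with ⟨_, _, hc⟩
              simp only [pvHead5] at hc
              split_ifs at hc <;> omega
          have key := ih (g + (d + c)) A' B' (pvHead5 (t :: rs)) hrest
            (by right; right; exact ⟨by omega, by omega, rfl⟩)
            (by intro h; cases h)
          rw [solutionLoop_two, if_neg hne, if_pos heq]
          rw [heq] at key ⊢
          by_cases hts : t ≥ 5
          · rw [if_pos hts]
            simpa [pvBump, pvHead5, hts] using key
          · rw [if_neg hts]
            simpa [pvBump, pvHead5, hts] using key
      · -- effective digit > 5: greedy rounds up, carry out 1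
        have h6 : 6 ≤ d + c := by omega
        cases rest with
        | nil =>
          rw [solutionLoop_cons, if_neg h5, if_neg heq]
          simp only [solutionLoop_nil, solutionAltLoop]
          rcases hinv with h | h | h
          · omega
          · omega
          · rcases h with ⟨_, _, hc⟩
            simp only [pvHead5] at hc
            split_ifs at hc <;> omega
        | cons t rs =>
          have ht := hrest t (by simp)
          have key := ih (g + (10 - (d + c))) A' B' 1 hrest
            (by
              right; left
              refine ⟨rfl, ?_, ?_⟩ <;>
              · rcases hinv with h | h | h
                · omega
                · omega
                · rcases h with ⟨ha, hb, hc⟩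
                  simp only [pvHead5] at hc
                  split_ifs at hc <;> omega)
            (by intro h; cases h)
          rw [solutionLoop_two, if_neg h5, if_neg heq]
          simpa [pvBump] using key

-- characterisation of Nat.toDigits via Nat.digits
lemma toDigitsCore_eq : ∀ (f m : Nat) (acc : List Char), m < f →
    Nat.toDigitsCore 10 f m acc =
      (if m = 0 then ['0'] else ((Nat.digits 10 m).map Nat.digitChar).reverse) ++ acc := by
  intro f
  induction f with
  | zero => intro m acc h; omega
  | succ f ih =>
    intro m acc h
    rw [Nat.toDigitsCore]
    by_cases hz : m / 10 = 0
    · simp only [hz, if_pos]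
      by_cases hm0 : m = 0
      · subst hm0; simp [Nat.digitChar]
      · have hlt : m < 10 := by omega
        rw [if_neg hm0, Nat.digits_def' (by norm_num) (by omega)]
        have : Nat.digits 10 (m / 10) = [] := by rw [hz]; simp
        simp [this, Nat.mod_eq_of_lt hlt]
    · simp only [hz, if_false]
      have h10 : 10 ≤ m := by omega
      rw [ih (m / 10) _ (by omega)]
      rw [if_neg hz]
      rw [Nat.digits_def' (show (1:Nat) < 10 by norm_num) (show 0 < m by omega)]
      rw [if_neg (show ¬ m = 0 by omega)]
      simp

lemma pv_parse_digitChar (k : Nat) (h : k ≤ 9) :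
    (PySem.Int.ofChars? [Nat.digitChar k]).getD 0 = (k : Int) := by
  interval_cases k <;> decide

lemma solutionDigits_reverse (storey : Int) (h : 0 ≤ storey) :
    (solutionDigits storey).reverse =
      if storey = 0 then [0] else (Nat.digits 10 storey.toNat).map (fun k : Nat => (k : Int)) := by
  unfold solutionDigits
  have htc : PySem.Int.toChars storey = Nat.toDigits 10 storey.toNat := by
    simp [PySem.Int.toChars, not_lt.mpr h]
  rw [htc]
  unfold Nat.toDigits
  rw [toDigitsCore_eq _ _ _ (by omega)]
  by_cases hz : storey = 0
  · subst hz; simp; decide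
  · have hm : storey.toNat ≠ 0 := by omega
    rw [if_neg hm, if_neg hz]
    simp only [List.append_nil, List.map_reverse, List.reverse_reverse, List.map_map]
    refine List.map_congr_left ?_
    intro k hk
    have hlt := Nat.digits_lt_base (b := 10) (by norm_num) hk
    simpa using pv_parse_digitChar k (by omega)

-- ===== VERDICT (by name: the statement is the Claim_ definition above) =====
theorem solution_spec : Claim_equal_solution := by
  intro storey _ hpre'
  have hpre : 0 ≤ storey := hpre'
  unfold Spec_solution solution solution_alt
  have halt : solutionAltDigits storey = solutionDigits storey := rfl
  rw [halt]
  have hrev := solutionDigits_reverse storey hpre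
  have hdig : ∀ d ∈ (solutionDigits storey).reverse, 0 ≤ d ∧ d ≤ 9 := by
    rw [hrev]
    by_cases hz : storey = 0
    · rw [if_pos hz]; intro d hd; simp at hd; omega
    · rw [if_neg hz]
      intro d hd
      simp only [List.mem_map] at hd
      obtain ⟨k, hk, rfl⟩ := hd
      have := Nat.digits_lt_base (b := 10) (by norm_num) hk
      omega
  -- the digit list is never empty
  cases hL : (solutionDigits storey).reverse with
  | nil =>
    exfalso
    rw [hrev] at hL
    by_cases hz : storey = 0
    · rw [if_pos hz] at hL; cases hL
    · rw [if_neg hz] at hL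
      have : Nat.digits 10 storey.toNat ≠ [] := by
        simp [Nat.digits_ne_nil_iff_ne_zero]; omega
      simp at hL
      exact this hL
  | cons d rest =>
    rw [hL] at hdig
    have hd := hdig d (by simp)
    have hrest : ∀ x ∈ rest, 0 ≤ x ∧ x ≤ 9 := fun x hx => hdig x (by simp [hx])
    simp only []
    -- one greedy step on the first digit d establishes the DP invariant
    by_cases h5 : d < 5
    · rw [solutionLoop_cons, if_pos h5]
      have key := loop_dp rest d d (10 - d) 0 hrest (by left; omega) (fun _ => rfl)
      rw [pvBump_zero] at key
      simpa using key
    · by_cases heq : d = 5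
      · subst heq
        cases rest with
        | nil =>
          rw [solutionLoop_one]
          norm_num
          rw [solutionLoop_nil]
          simp [solutionAltLoop]
        | cons t rs =>
          have ht := hrest t (by simp)
          have key := loop_dp (t :: rs) 5 5 (10 - 5) (pvHead5 (t :: rs)) hrest
            (by right; right; exact ⟨rfl, by norm_num, rfl⟩) (by intro h; cases h)
          rw [solutionLoop_two, if_neg (by norm_num), if_pos rfl]
          by_cases hts : t ≥ 5
          · rw [if_pos hts]
            simpa [pvBump, pvHead5, hts] using key
          · rw [if_neg hts]
            simpa [pvBump, pvHead5, hts] using key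
      · -- d > 5
        cases rest with
        | nil =>
          rw [solutionLoop_one, if_neg h5, if_neg heq, solutionLoop_nil]
          simp only [solutionAltLoop]
          omega
        | cons t rs =>
          have key := loop_dp (t :: rs) (10 - d) d (10 - d) 1 hrest
            (by right; left; omega) (by intro h; cases h)
          rw [solutionLoop_two, if_neg h5, if_neg heq]
          simpa [pvBump] using key
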